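-- pv_equiv track=rewrite | github.com/cjkootch/procur_dashboard | scripts/scrapers/caribbean_fuel/build_master_db.py | fuel_category_from_unspsc
-- ===== SOURCE A (Python) =====
-- def fuel_category_from_unspsc(codes):
--     cats = set()
--     for c in codes or []:
--         c = str(c)
--         if c in {"15101502", "15101505"}: cats.add("diesel")
--         elif c in {"15101503", "15101506"}: cats.add("gasoline")
--         elif c in {"15101504", "15101510"}: cats.add("aviation")
--         elif c == "15101508": cats.add("crude")
--         elif c in {"15101509", "15101516"}: cats.add("marine_bunker")
--         elif c == "15101512": cats.add("lpg")
--         elif c == "15101517": cats.add("lng")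
--         elif c == "15101701": cats.add("heating_oil")
--         elif c == "15101702": cats.add("heavy_fuel_oil")
--     return sorted(cats)
-- ===== SOURCE B (Python) =====
-- # B: iterate over the fixed category table (alphabetical) instead of dispatching per code;
-- # a category is emitted when any of its UNSPSC codes appears in the input, so the result
-- # comes out already sorted with no per-code if-chain and no final sort.
-- _CATEGORIES = [
--     ("aviation", ("15101504", "15101510")),
--     ("crude", ("15101508",)),
--     ("diesel", ("15101502", "15101505")),
--     ("gasoline", ("15101503", "15101506")),
--     ("heating_oil", ("15101701",)),
--     ("heavy_fuel_oil", ("15101702",)),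
--     ("lng", ("15101517",)),
--     ("lpg", ("15101512",)),
--     ("marine_bunker", ("15101509", "15101516")),
-- ]
--
-- def fuel_category_from_unspsc(codes):
--     seen = {str(c) for c in (codes or [])}
--     return [name for name, cs in _CATEGORIES if any(c in seen for c in cs)]
-- ===== Notes on version B (the rewrite author's own statement) =====
-- stated objective: alternative
-- what changed: B iterates over a fixed alphabetical category->codes table and emits each category whose codes meet the input code set, instead of A's per-code if/elif dispatch into a set followed by a final sort.
import Mathlib
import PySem

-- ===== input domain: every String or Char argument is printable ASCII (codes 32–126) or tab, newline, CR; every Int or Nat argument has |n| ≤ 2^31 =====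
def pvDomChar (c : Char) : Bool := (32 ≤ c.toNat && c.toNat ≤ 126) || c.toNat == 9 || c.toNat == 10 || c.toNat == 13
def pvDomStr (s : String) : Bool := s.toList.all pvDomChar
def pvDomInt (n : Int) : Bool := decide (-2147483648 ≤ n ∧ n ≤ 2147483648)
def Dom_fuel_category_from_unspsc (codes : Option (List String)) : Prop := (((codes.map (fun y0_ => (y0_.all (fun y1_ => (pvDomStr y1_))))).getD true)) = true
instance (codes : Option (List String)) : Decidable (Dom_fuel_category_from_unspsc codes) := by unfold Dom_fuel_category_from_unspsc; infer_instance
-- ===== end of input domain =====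

-- B iterates over a fixed alphabetical category→codes table and emits a category when one of
-- its codes occurs in the input, instead of A's per-code if/elif dispatch into a set + final sort.

-- ===== PORT A =====
def fuel_category_from_unspsc (codes : Option (List String)) : List String :=
  let cats : PySem.Set String :=
    (codes.getD []).foldl (fun cats c =>
      if c = "15101502" ∨ c = "15101505" then PySem.Set.add cats "diesel"
      else if c = "15101503" ∨ c = "15101506" then PySem.Set.add cats "gasoline"
      else if c = "15101504" ∨ c = "15101510" then PySem.Set.add cats "aviation"
      else if c = "15101508" then PySem.Set.add cats "crude"
      else if c = "15101509" ∨ c = "15101516" then PySem.Set.add cats "marine_bunker"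
      else if c = "15101512" then PySem.Set.add cats "lpg"
      else if c = "15101517" then PySem.Set.add cats "lng"
      else if c = "15101701" then PySem.Set.add cats "heating_oil"
      else if c = "15101702" then PySem.Set.add cats "heavy_fuel_oil"
      else cats) PySem.Set.empty
  PySem.List.sorted cats (fun x => x) false

-- ===== PORT B =====
def pvCategories : List (String × List String) :=
  [("aviation", ["15101504", "15101510"]),
   ("crude", ["15101508"]),
   ("diesel", ["15101502", "15101505"]),
   ("gasoline", ["15101503", "15101506"]),
   ("heating_oil", ["15101701"]),
   ("heavy_fuel_oil", ["15101702"]),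
   ("lng", ["15101517"]),
   ("lpg", ["15101512"]),
   ("marine_bunker", ["15101509", "15101516"])]

def fuel_category_from_unspsc_alt (codes : Option (List String)) : List String :=
  let seen : PySem.Set String := PySem.Set.ofList (codes.getD [])
  (pvCategories.filter (fun p => p.2.any (fun c => PySem.Set.contains seen c))).map Prod.fst

-- ===== PRECONDITION & SPEC =====
def Spec_fuel_category_from_unspsc (codes : Option (List String)) (out : List String) : Prop := out = fuel_category_from_unspsc_alt codes
instance (codes : Option (List String)) (out : List String) : Decidable (Spec_fuel_category_from_unspsc codes out) := by unfold Spec_fuel_category_from_unspsc; infer_instance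

-- ===== CLAIM (what is proved, stated in full; the proofs are below) =====
def Claim_equal_fuel_category_from_unspsc : Prop := ∀ (codes : Option (List String)), Dom_fuel_category_from_unspsc codes → Spec_fuel_category_from_unspsc codes (fuel_category_from_unspsc codes)

-- ===== LEMMAS AND PROOFS =====

-- the per-code dispatch of A's loop body, viewed as a partial map code → category
def pvCatOf (c : String) : Option String :=
  if c = "15101502" ∨ c = "15101505" then some "diesel"
  else if c = "15101503" ∨ c = "15101506" then some "gasoline"
  else if c = "15101504" ∨ c = "15101510" then some "aviation"
  else if c = "15101508" then some "crude"
  else if c = "15101509" ∨ c = "15101516" then some "marine_bunker"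
  else if c = "15101512" then some "lpg"
  else if c = "15101517" then some "lng"
  else if c = "15101701" then some "heating_oil"
  else if c = "15101702" then some "heavy_fuel_oil"
  else none

theorem pvStep_eq (cats : PySem.Set String) (c : String) :
    (if c = "15101502" ∨ c = "15101505" then PySem.Set.add cats "diesel"
      else if c = "15101503" ∨ c = "15101506" then PySem.Set.add cats "gasoline"
      else if c = "15101504" ∨ c = "15101510" then PySem.Set.add cats "aviation"
      else if c = "15101508" then PySem.Set.add cats "crude"
      else if c = "15101509" ∨ c = "15101516" then PySem.Set.add cats "marine_bunker"
      else if c = "15101512" then PySem.Set.add cats "lpg"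
      else if c = "15101517" then PySem.Set.add cats "lng"
      else if c = "15101701" then PySem.Set.add cats "heating_oil"
      else if c = "15101702" then PySem.Set.add cats "heavy_fuel_oil"
      else cats)
    = match pvCatOf c with
      | some k => PySem.Set.add cats k
      | none => cats := by
  unfold pvCatOf
  split_ifs <;> rfl

theorem fuel_a_eq (codes : Option (List String)) :
    fuel_category_from_unspsc codes
      = PySem.List.sorted ((codes.getD []).foldl (fun s c =>
          match pvCatOf c with
          | some k => PySem.Set.add s k
          | none => s) PySem.Set.empty) (fun x => x) false := by
  simp only [fuel_category_from_unspsc]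
  refine congrArg (fun l => PySem.List.sorted l (fun x => x) false) ?_
  refine congrFun (congrFun (congrArg List.foldl ?_) PySem.Set.empty) (codes.getD [])
  funext cats c
  exact pvStep_eq cats c

theorem mem_foldl_catOf (l : List String) (s : PySem.Set String) (x : String) :
    x ∈ l.foldl (fun s c => match pvCatOf c with
                            | some k => PySem.Set.add s k
                            | none => s) s
      ↔ x ∈ s ∨ ∃ c ∈ l, pvCatOf c = some x := by
  induction l generalizing s with
  | nil => simp
  | cons c t ih =>
    simp only [List.foldl_cons]
    cases h : pvCatOf c with
    | none =>
      rw [ih]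
      constructor
      · rintro (hs | ⟨d, hd, hdx⟩)
        · exact Or.inl hs
        · exact Or.inr ⟨d, List.mem_cons_of_mem _ hd, hdx⟩
      · rintro (hs | ⟨d, hd, hdx⟩)
        · exact Or.inl hs
        · rcases List.mem_cons.1 hd with rfl | hd'
          · rw [h] at hdx; cases hdx
          · exact Or.inr ⟨d, hd', hdx⟩
    | some k =>
      rw [ih, PySem.Set.mem_add]
      constructor
      · rintro ((hs | hk) | ⟨d, hd, hdx⟩)
        · exact Or.inl hs
        · exact Or.inr ⟨c, by simp, by rw [h, hk]⟩
        · exact Or.inr ⟨d, List.mem_cons_of_mem _ hd, hdx⟩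
      · rintro (hs | ⟨d, hd, hdx⟩)
        · exact Or.inl (Or.inl hs)
        · rcases List.mem_cons.1 hd with rfl | hd'
          · rw [h] at hdx; exact Or.inl (Or.inr (Option.some.inj hdx).symm)
          · exact Or.inr ⟨d, hd', hdx⟩

theorem nodup_foldl_catOf (l : List String) (s : PySem.Set String) (hs : s.Nodup) :
    (l.foldl (fun s c => match pvCatOf c with
                         | some k => PySem.Set.add s k
                         | none => s) s).Nodup := by
  induction l generalizing s with
  | nil => exact hs
  | cons c t ih =>
    simp only [List.foldl_cons]
    cases h : pvCatOf c with
    | none => exact ih _ hs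
    | some k => exact ih _ (PySem.Set.nodup_add _ _ hs)

theorem pvCatOf_table (c x : String) :
    pvCatOf c = some x ↔ ∃ p ∈ pvCategories, p.1 = x ∧ c ∈ p.2 := by
  unfold pvCatOf pvCategories
  split_ifs <;>
    (try (rename_i h; first | (obtain rfl | rfl := h) | subst h)) <;>
    simp_all

theorem mem_alt (codes : Option (List String)) (x : String) :
    x ∈ fuel_category_from_unspsc_alt codes ↔ ∃ c ∈ codes.getD [], pvCatOf c = some x := by
  unfold fuel_category_from_unspsc_alt
  simp only [List.mem_map, List.mem_filter, List.any_eq_true,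
    PySem.Set.contains_iff, PySem.Set.mem_ofList]
  constructor
  · rintro ⟨p, ⟨hp, ⟨c, hc, hcs⟩⟩, rfl⟩
    exact ⟨c, hcs, (pvCatOf_table c p.1).2 ⟨p, hp, rfl, hc⟩⟩
  · rintro ⟨c, hc, hcx⟩
    obtain ⟨p, hp, hpx, hcp⟩ := (pvCatOf_table c x).1 hcx
    exact ⟨p, ⟨hp, ⟨c, hcp, hc⟩⟩, hpx⟩

theorem pvCats_pairwise : List.Pairwise (fun p q : String × List String => p.1 < q.1) pvCategories := by
  have h : List.Pairwise (fun a b : String => a < b) (pvCategories.map Prod.fst) := by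
    unfold pvCategories
    simp only [List.map]
    repeat' constructor
    all_goals (intro y hy; fin_cases hy <;> (rw [String.lt_iff_toList_lt]; decide))
  exact (List.pairwise_map).1 h

theorem pairwise_alt (codes : Option (List String)) :
    (fuel_category_from_unspsc_alt codes).Pairwise (fun a b => a < b) := by
  unfold fuel_category_from_unspsc_alt
  rw [List.pairwise_map]
  exact List.Pairwise.filter _ pvCats_pairwise

theorem nodup_alt (codes : Option (List String)) :
    (fuel_category_from_unspsc_alt codes).Nodup :=
  (pairwise_alt codes).imp (fun h => ne_of_lt h)

-- ===== VERDICT (by name: the statement is the Claim_ definition above) =====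
theorem fuel_category_from_unspsc_spec : Claim_equal_fuel_category_from_unspsc := by
  intro codes _
  unfold Spec_fuel_category_from_unspsc
  rw [fuel_a_eq]
  apply PySem.List.sorted_eq_of_perm_of_pairwise_lt
  · refine (List.perm_ext_iff_of_nodup (nodup_alt codes)
      (nodup_foldl_catOf _ _ (by simp [PySem.Set.empty]))).2 ?_
    intro x
    rw [mem_alt, mem_foldl_catOf]
    simp [PySem.Set.empty]
  · exact pairwise_alt codes
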